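-- pv_equiv track=rewrite | github.com/financieras/pyEjemplos | elimina_vocales.py | procesa
-- ===== SOURCE A (Python) =====
-- def procesa(texto):
--     vocales=('a','e','i','o','u')
--     texto=texto.replace('o','0')
--     texto=texto.replace('O','0')
--     for vocal in vocales:
--         texto=texto.replace(vocal,'')
--         texto=texto.replace(vocal.upper(),'')
--     return texto
-- ===== SOURCE B (Python) =====
-- def procesa(texto):
--     return ''.join(
--         '0' if c in 'oO' else '' if c in 'aeiuAEIU' else c
--         for c in texto
--     )
-- ===== Notes on version B (the rewrite author's own statement) =====
-- stated objective: simpler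
-- what changed: B classifies each character once in a single left-to-right pass (o/O -> '0', other vowels dropped, everything else kept) instead of A's twelve whole-string replace passes.
import Mathlib
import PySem

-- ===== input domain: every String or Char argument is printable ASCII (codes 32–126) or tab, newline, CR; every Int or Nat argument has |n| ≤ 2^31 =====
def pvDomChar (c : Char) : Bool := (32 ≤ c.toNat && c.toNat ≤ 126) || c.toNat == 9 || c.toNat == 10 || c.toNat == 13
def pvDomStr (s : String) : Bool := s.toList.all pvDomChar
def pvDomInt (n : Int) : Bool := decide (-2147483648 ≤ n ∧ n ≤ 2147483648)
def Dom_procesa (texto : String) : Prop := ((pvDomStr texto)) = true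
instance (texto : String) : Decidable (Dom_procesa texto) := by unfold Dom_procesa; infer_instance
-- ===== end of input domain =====

-- B replaces A's twelve whole-string replace passes by one left-to-right classification pass (simpler).

-- ===== PORT A =====
def procesa (texto : String) : String :=
  -- vocales=('a','e','i','o','u')
  let vocales : List Char := ['a', 'e', 'i', 'o', 'u']
  -- texto=texto.replace('o','0'); texto=texto.replace('O','0')
  let t := PySem.Str.replace texto "o" "0"
  let t := PySem.Str.replace t "O" "0"
  -- for vocal in vocales: texto=texto.replace(vocal,''); texto=texto.replace(vocal.upper(),'')
  vocales.foldl
    (fun t vocal =>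
      let t := PySem.Str.replace t (String.ofList [vocal]) ""
      PySem.Str.replace t (PySem.Str.upper (String.ofList [vocal])) "")
    t

-- ===== PORT B =====
-- ''.join('0' if c in 'oO' else '' if c in 'aeiuAEIU' else c for c in texto)
def procesa_alt (texto : String) : String :=
  String.ofList (texto.toList.flatMap (fun c =>
    if c = 'o' ∨ c = 'O' then ['0']
    else if c ∈ ['a', 'e', 'i', 'u', 'A', 'E', 'I', 'U'] then []
    else [c]))

-- ===== PRECONDITION & SPEC =====
def Spec_procesa (texto : String) (out : String) : Prop := out = procesa_alt texto
instance (texto : String) (out : String) : Decidable (Spec_procesa texto out) := by unfold Spec_procesa; infer_instance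

-- ===== CLAIM =====
def Claim_equal_procesa : Prop := ∀ (texto : String), Dom_procesa texto → Spec_procesa texto (procesa texto)

-- ===== LEMMAS AND PROOFS =====

-- replacing a single character a by the list n is the per-character flatMap
theorem replace_go_single (a : Char) (n : List Char) :
    ∀ (fuel : Nat) (l acc : List Char), l.length ≤ fuel →
      PySem.Chars.replace.go [a] n fuel l acc
        = acc.reverse ++ l.flatMap (fun c => if c = a then n else [c]) := by
  intro fuel
  induction fuel with
  | zero =>
    intro l acc h
    have : l = [] := List.eq_nil_of_length_eq_zero (Nat.le_zero.mp h)
    subst this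
    simp [PySem.Chars.replace.go]
  | succ k ih =>
    intro l acc h
    cases l with
    | nil => simp [PySem.Chars.replace.go]
    | cons c t =>
      simp only [PySem.Chars.replace.go]
      by_cases hc : c = a
      · subst hc
        have hp : List.isPrefixOf [c] (c :: t) = true := by
          simp [List.isPrefixOf]
        rw [if_pos hp]
        simp only [List.length_cons, List.length_nil, Nat.zero_add, List.drop_succ_cons, List.drop_zero]
        rw [ih t (n.reverse ++ acc) (by simpa using Nat.le_of_succ_le_succ h)]
        simp [List.flatMap_cons]
      · have hp : List.isPrefixOf [a] (c :: t) = false := by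
          simp [List.isPrefixOf]
          exact fun h' => absurd h'.symm hc
        rw [if_neg (by simp [hp])]
        rw [ih t (c :: acc) (by simpa using Nat.le_of_succ_le_succ h)]
        simp [List.flatMap_cons, hc]

theorem replace_single (s : List Char) (a : Char) (n : List Char) :
    PySem.Chars.replace s [a] n = s.flatMap (fun c => if c = a then n else [c]) := by
  rw [PySem.Chars.replace]
  simp only [List.isEmpty_cons, if_false, Bool.false_eq_true]
  simpa using replace_go_single a n s.length s [] (le_refl _)

-- the composite of A's twelve per-character substitutions, character by character
theorem composite_char (c : Char) :
    (List.flatMap (fun c =>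
      List.flatMap (fun c =>
        List.flatMap (fun c =>
          List.flatMap (fun c =>
            List.flatMap (fun c =>
              List.flatMap (fun c =>
                List.flatMap (fun c =>
                  List.flatMap (fun c =>
                    List.flatMap (fun c =>
                      List.flatMap (fun c =>
                        List.flatMap (fun c => if c = 'U' then [] else [c])
                          (if c = 'u' then [] else [c]))
                        (if c = 'O' then [] else [c]))
                      (if c = 'o' then [] else [c]))
                    (if c = 'I' then [] else [c]))
                  (if c = 'i' then [] else [c]))
                (if c = 'E' then [] else [c]))
              (if c = 'e' then [] else [c]))
            (if c = 'A' then [] else [c]))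
          (if c = 'a' then [] else [c]))
        (if c = 'O' then ['0'] else [c]))
      (if c = 'o' then ['0'] else [c]))
    = (if c = 'o' ∨ c = 'O' then ['0']
       else if c ∈ ['a', 'e', 'i', 'u', 'A', 'E', 'I', 'U'] then []
       else [c]) := by
  by_cases h1 : c = 'o'; · subst h1; decide
  by_cases h2 : c = 'O'; · subst h2; decide
  by_cases h3 : c = 'a'; · subst h3; decide
  by_cases h4 : c = 'A'; · subst h4; decide
  by_cases h5 : c = 'e'; · subst h5; decide
  by_cases h6 : c = 'E'; · subst h6; decide
  by_cases h7 : c = 'i'; · subst h7; decide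
  by_cases h8 : c = 'I'; · subst h8; decide
  by_cases h9 : c = 'u'; · subst h9; decide
  by_cases h10 : c = 'U'; · subst h10; decide
  simp [h1, h2, h3, h4, h5, h6, h7, h8, h9, h10]

-- bridge: Str.replace down to Chars.replace
theorem str_replace_toList (s old n : String) :
    (PySem.Str.replace s old n).toList
      = PySem.Chars.replace s.toList old.toList n.toList := by
  simp [PySem.Str.replace]

-- char-list values of the literal strings A uses
theorem lit_o : ("o" : String).toList = ['o'] := by decide
theorem lit_O : ("O" : String).toList = ['O'] := by decide
theorem lit_z : ("0" : String).toList = ['0'] := by decide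
theorem lit_e : ("" : String).toList = [] := by decide
theorem lit_ua : (PySem.Str.upper (String.ofList ['a'])).toList = ['A'] := by decide
theorem lit_ue : (PySem.Str.upper (String.ofList ['e'])).toList = ['E'] := by decide
theorem lit_ui : (PySem.Str.upper (String.ofList ['i'])).toList = ['I'] := by decide
theorem lit_uo : (PySem.Str.upper (String.ofList ['o'])).toList = ['O'] := by decide
theorem lit_uu : (PySem.Str.upper (String.ofList ['u'])).toList = ['U'] := by decide

-- ===== VERDICT =====
theorem procesa_spec : Claim_equal_procesa := by
  intro texto _
  unfold Spec_procesa procesa procesa_alt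
  simp only [List.foldl_cons, List.foldl_nil]
  rw [← String.toList_inj]
  simp only [str_replace_toList, String.toList_ofList,
    lit_o, lit_O, lit_z, lit_e,
    lit_ua, lit_ue, lit_ui, lit_uo, lit_uu,
    replace_single, List.flatMap_assoc]
  exact List.flatMap_congr (fun c _ => composite_char c)
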